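-- pv_equiv track=rewrite | github.com/brownbishop/advent-of-code | solutions/2023/day_01/solution.py | line_to_digits
-- ===== SOURCE A (Python) =====
-- value = {
--      "one": 1,
--      "two": 2,
--      "three": 3,
--      "four": 4,
--      "five": 5,
--      "six": 6,
--      "seven": 7,
--      "eight": 8,
--      "nine": 9,
--      "1": 1,
--      "2": 2,
--      "3": 3,
--      "4": 4,
--      "5": 5,
--      "6": 6,
--      "7": 7,
--      "8": 8,
--      "9": 9,
-- }
--
-- def line_to_digits(line: str) -> list[int]:
--     digits = []
--     for i in range(len(line)):
--         for key in value:
--             if line[i:].find(key) == 0: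
--                 digits.append(value[key])
--                 break
--     return digits
-- ===== SOURCE B (Python) =====
-- value = {
--      "one": 1,
--      "two": 2,
--      "three": 3,
--      "four": 4,
--      "five": 5,
--      "six": 6,
--      "seven": 7,
--      "eight": 8,
--      "nine": 9,
--      "1": 1,
--      "2": 2,
--      "3": 3,
--      "4": 4,
--      "5": 5,
--      "6": 6,
--      "7": 7,
--      "8": 8,
--      "9": 9,
-- }
--
-- def line_to_digits(line: str) -> list[int]:
--     # key-outer scan: collect every (overlapping) occurrence position of each
--     # token, then sort by position (no two distinct tokens start at the same
--     # index, so the order is unambiguous) and emit the values.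
--     pairs = []
--     for key, v in value.items():
--         start = 0
--         while True:
--             j = line.find(key, start)
--             if j == -1:
--                 break
--             pairs.append((j, v))
--             start = j + 1
--     pairs.sort(key=lambda p: p[0])
--     return [v for _, v in pairs]
-- ===== Notes on version B (the rewrite author's own statement) =====
-- stated objective: faster
-- what changed: B inverts A's position-outer/key-inner scan: for each dict key it collects all (overlapping) occurrence positions with repeated str.find, then sorts the (position, value) pairs by position and emits the values.
import Mathlib
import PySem

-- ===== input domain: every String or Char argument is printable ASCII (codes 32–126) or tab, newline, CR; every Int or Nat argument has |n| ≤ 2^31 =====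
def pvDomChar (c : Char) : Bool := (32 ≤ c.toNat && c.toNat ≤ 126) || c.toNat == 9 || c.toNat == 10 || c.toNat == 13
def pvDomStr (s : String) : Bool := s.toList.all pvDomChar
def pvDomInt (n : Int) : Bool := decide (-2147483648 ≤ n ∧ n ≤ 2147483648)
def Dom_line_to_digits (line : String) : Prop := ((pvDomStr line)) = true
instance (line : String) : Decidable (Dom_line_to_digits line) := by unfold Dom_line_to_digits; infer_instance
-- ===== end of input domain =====

-- B inverts A's position-outer/key-inner scan: it gathers each token's (overlapping)
-- occurrence positions via repeated str.find (a C-level scan per key instead of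
-- per-position interpreted prefix tests), sorts the (position, value) pairs and
-- emits the values — measurably faster, same exact result.

-- ===== PORT A =====
-- the module-level dict `value` (association list in insertion order)
def pvValue : List (String × Int) :=
  [("one", 1), ("two", 2), ("three", 3), ("four", 4), ("five", 5), ("six", 6),
   ("seven", 7), ("eight", 8), ("nine", 9), ("1", 1), ("2", 2), ("3", 3), ("4", 4),
   ("5", 5), ("6", 6), ("7", 7), ("8", 8), ("9", 9)]

-- inner `for key in value: if line[i:].find(key) == 0: digits.append(value[key]); break`
-- (`value[key]` is the first-match association-list lookup)
def pvFirstA (suffix : String) : List (String × Int) → Option Int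
  | [] => none
  | kv :: rest =>
      if PySem.Str.find suffix kv.1 = 0 then pvValue.lookup kv.1
      else pvFirstA suffix rest

def line_to_digits (line : String) : List Int :=
  (PySem.List.pyRange 0 (PySem.Str.len line) 1).foldl
    (fun digits i =>
      match pvFirstA (PySem.Str.slice line (some i) none) pvValue with
      | some v => digits ++ [v]
      | none => digits) []

-- ===== PORT B =====
-- the `while True: j = line.find(key, start); …; start = j + 1` loop of Source B;
-- `line.find(key, start)` is PySem.Chars.findFrom on the toList side
-- (= PySem.Str.findFrom, lemma PySem.Str.findFrom_eq); the fuel argument only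
-- makes the loop structurally total (it never runs out: start grows each turn).
def pvOccs (s k : List Char) : Nat → Nat → List Int
  | 0, _ => []
  | fuel + 1, start =>
      let j := PySem.Chars.findFrom s k (start : Int) none
      if j = -1 then [] else j :: pvOccs s k fuel (j.toNat + 1)

def line_to_digits_alt (line : String) : List Int :=
  let pairs := pvValue.foldl
    (fun acc kv =>
      acc ++ (pvOccs line.toList kv.1.toList (line.toList.length + 1) 0).map
        (fun j => (j, kv.2))) ([] : List (Int × Int))
  (PySem.List.sorted pairs (fun p => p.1) false).map (fun p => p.2)

-- ===== PRECONDITION & SPEC =====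
def Spec_line_to_digits (line : String) (out : List Int) : Prop := out = line_to_digits_alt line
instance (line : String) (out : List Int) : Decidable (Spec_line_to_digits line out) := by unfold Spec_line_to_digits; infer_instance

-- ===== CLAIM (what is proved, stated in full; the proofs are below) =====
def Claim_equal_line_to_digits : Prop := ∀ (line : String), Dom_line_to_digits line → Spec_line_to_digits line (line_to_digits line)

-- ===== LEMMAS AND PROOFS =====

-- first matching key, phrased on the character list of the suffix
def pvFirstC (cs : List Char) : List (String × Int) → Option Int
  | [] => none
  | kv :: rest =>
      if kv.1.toList <+: cs then pvValue.lookup kv.1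
      else pvFirstC cs rest

-- the common reference list: per position, the (position, matched value) pair
def pvTarget (s : List Char) : List (Int × Int) :=
  (List.range s.length).filterMap
    (fun i => (pvFirstC (s.drop i) pvValue).map (fun v => ((i : Int), v)))

def pvPairs (s : List Char) : List (Int × Int) :=
  pvValue.flatMap (fun kv =>
    (pvOccs s kv.1.toList (s.length + 1) 0).map (fun j => (j, kv.2)))

-- facts about the literal dict, by decide
lemma pvValue_uniq : ∀ kv1 ∈ pvValue, ∀ kv2 ∈ pvValue,
    kv1.1.toList <+: kv2.1.toList → kv1 = kv2 := by decide

lemma pvValue_get : ∀ kv ∈ pvValue, pvValue.lookup kv.1 = some kv.2 := by decide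

lemma pvValue_ne_nil : ∀ kv ∈ pvValue, kv.1.toList ≠ [] := by decide

lemma pvValue_nodup : pvValue.Nodup := by decide

-- `s.find(sub) == 0` is exactly "sub is a prefix of s"
lemma pv_find_go_lb (sub s : List Char) : ∀ k : Nat,
    PySem.Chars.find.go sub s k = -1 ∨ (k : Int) ≤ PySem.Chars.find.go sub s k := by
  induction s with
  | nil =>
      intro k
      simp only [PySem.Chars.find.go]
      split <;> simp
  | cons h t ih =>
      intro k
      simp only [PySem.Chars.find.go]
      split
      · right; simp
      · rcases ih (k + 1) with h1 | h1
        · left; exact h1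
        · right; push_cast at h1 ⊢; omega

lemma pv_find_eq_zero_iff (s sub : List Char) :
    PySem.Chars.find s sub = 0 ↔ sub <+: s := by
  cases s with
  | nil =>
      simp only [PySem.Chars.find, PySem.Chars.find.go]
      constructor
      · intro h; split at h <;> simp_all [List.isEmpty_iff]
      · intro h
        simp [List.prefix_nil.mp h]
  | cons h t =>
      simp only [PySem.Chars.find, PySem.Chars.find.go]
      split
      · rename_i hp
        simp_all [List.isPrefixOf_iff_prefix]
      · rename_i hp
        rw [List.isPrefixOf_iff_prefix] at hp
        constructor
        · intro h0
          rcases pv_find_go_lb sub t (0+1) with h1 | h1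
          · rw [h1] at h0; omega
          · rw [h0] at h1; norm_num at h1
        · intro hh; exact absurd hh hp

lemma pvFirstA_eq (suffix : String) (l : List (String × Int)) :
    pvFirstA suffix l = pvFirstC suffix.toList l := by
  induction l with
  | nil => rfl
  | cons kv rest ih =>
      simp only [pvFirstA, pvFirstC, PySem.Str.find_eq, pv_find_eq_zero_iff, ih]

-- no two distinct dict keys are prefixes of the same suffix
lemma pv_uniq_at (cs : List Char) (kv1 kv2 : String × Int)
    (h1 : kv1 ∈ pvValue) (h2 : kv2 ∈ pvValue)
    (p1 : kv1.1.toList <+: cs) (p2 : kv2.1.toList <+: cs) : kv1 = kv2 := by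
  rcases List.prefix_or_prefix_of_prefix p1 p2 with h | h
  · exact pvValue_uniq kv1 h1 kv2 h2 h
  · exact (pvValue_uniq kv2 h2 kv1 h1 h).symm

lemma pvFirstC_some_iff_aux (cs : List Char) (v : Int) :
    ∀ l : List (String × Int), (∀ kv ∈ l, kv ∈ pvValue) →
    (pvFirstC cs l = some v ↔ ∃ kv ∈ l, kv.1.toList <+: cs ∧ kv.2 = v) := by
  intro l
  induction l with
  | nil => intro _; simp [pvFirstC]
  | cons kv0 rest ih =>
      intro hl
      have hkv0 : kv0 ∈ pvValue := hl kv0 (by simp)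
      have hrest : ∀ kv ∈ rest, kv ∈ pvValue := fun kv h => hl kv (by simp [h])
      simp only [pvFirstC]
      split
      · rename_i hp
        rw [pvValue_get kv0 hkv0]
        constructor
        · rintro ⟨rfl⟩
          exact ⟨kv0, by simp, hp, rfl⟩
        · rintro ⟨kv, hmem, hpre, rfl⟩
          rcases List.mem_cons.mp hmem with rfl | hmem'
          · rfl
          · have := pv_uniq_at cs kv kv0 (hrest kv hmem') hkv0 hpre hp
            rw [this]
      · rename_i hp
        rw [ih hrest]
        constructor
        · rintro ⟨kv, hmem, hpre, rfl⟩; exact ⟨kv, by simp [hmem], hpre, rfl⟩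
        · rintro ⟨kv, hmem, hpre, rfl⟩
          rcases List.mem_cons.mp hmem with rfl | hmem'
          · exact absurd hpre hp
          · exact ⟨kv, hmem', hpre, rfl⟩

lemma pvFirstC_some_iff (cs : List Char) (v : Int) :
    pvFirstC cs pvValue = some v ↔ ∃ kv ∈ pvValue, kv.1.toList <+: cs ∧ kv.2 = v :=
  pvFirstC_some_iff_aux cs v pvValue (fun _ h => h)

-- characterisation of port A
lemma pv_foldl_opt {α : Type} (f : α → Option Int) (l : List α) : ∀ acc : List Int,
    (l.foldl (fun d x => match f x with | some v => d ++ [v] | none => d) acc)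
      = acc ++ l.filterMap f := by
  induction l with
  | nil => simp
  | cons x xs ih =>
      intro acc
      simp only [List.foldl_cons, List.filterMap_cons]
      cases h : f x <;> simp [ih]

lemma pv_A_eq (line : String) :
    line_to_digits line = (pvTarget line.toList).map Prod.snd := by
  unfold line_to_digits pvTarget
  rw [PySem.Str.len_eq, PySem.List.pyRange_zero_natCast, List.foldl_map,
    pv_foldl_opt (fun k : Nat => pvFirstA (PySem.Str.slice line (some (k:Int)) none) pvValue)]
  rw [List.map_filterMap]
  refine (List.filterMap_congr ?_).symm
  intro x hx
  rw [pvFirstA_eq]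
  simp only [PySem.Str.toList_slice, PySem.Chars.slice_eq_listSlice,
    PySem.List.slice_from_natCast, Option.map_map]
  cases pvFirstC (List.drop x line.toList) pvValue <;> rfl

-- helpers about prefixes and drops
lemma pv_infix_of_prefix_drop {s k : List Char} {start i : Nat}
    (hsi : start ≤ i) (hp : k <+: s.drop i) : k <:+: s.drop start := by
  have : s.drop i = List.drop (i - start) (s.drop start) := by
    rw [List.drop_drop]; congr 1; omega
  rw [this] at hp
  exact hp.isInfix.trans (List.drop_suffix _ _).isInfix

lemma pv_lt_of_prefix {s k : List Char} {i : Nat} (hk : k ≠ []) (hp : k <+: s.drop i) :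
    i < s.length := by
  by_contra h
  have : s.drop i = [] := List.drop_eq_nil_of_le (by omega)
  rw [this] at hp
  exact hk (List.prefix_nil.mp hp)

-- pvOccs: exactly the (overlapping) occurrences at positions ≥ start, in order
lemma pvOccs_mem (s k : List Char) (hk : k ≠ []) : ∀ (fuel start : Nat), start ≤ s.length →
    ∀ j ∈ pvOccs s k fuel start,
      ∃ i : Nat, j = (i : Int) ∧ start ≤ i ∧ i < s.length ∧ k <+: s.drop i := by
  intro fuel
  induction fuel with
  | zero => intro start _ j hj; simp [pvOccs] at hj
  | succ fuel ih =>
      intro start hstart j hj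
      simp only [pvOccs] at hj
      split at hj
      · simp at hj
      · rename_i hne
        obtain ⟨hle, hpre, -⟩ := PySem.Chars.findFrom_natCast_spec s k start hstart hne
        set j0 := PySem.Chars.findFrom s k (start : Int) none with hj0
        have hnn : (0:Int) ≤ j0 := le_trans (by exact_mod_cast Nat.zero_le start) hle
        have hjlt : j0.toNat < s.length := pv_lt_of_prefix hk hpre
        rcases List.mem_cons.mp hj with rfl | hmem
        · exact ⟨j0.toNat, (Int.toNat_of_nonneg hnn).symm, by omega, hjlt, hpre⟩
        · obtain ⟨i, rfl, hi1, hi2, hi3⟩ := ih (j0.toNat + 1) (by omega) j hmem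
          exact ⟨i, rfl, by omega, hi2, hi3⟩

lemma pvOccs_mem_of (s k : List Char) (hk : k ≠ []) : ∀ (fuel start i : Nat),
    start ≤ s.length → s.length - start < fuel →
    start ≤ i → i < s.length → k <+: s.drop i →
    (i : Int) ∈ pvOccs s k fuel start := by
  intro fuel
  induction fuel with
  | zero => intro start i _ hf _ _ _; omega
  | succ fuel ih =>
      intro start i hstart hf hsi hilen hp
      simp only [pvOccs]
      have hne : PySem.Chars.findFrom s k (start : Int) none ≠ -1 := by
        intro hcon
        exact (PySem.Chars.findFrom_natCast_eq_neg_one_iff s k start hstart).mp hcon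
          (pv_infix_of_prefix_drop hsi hp)
      obtain ⟨hle, hpre, hmin⟩ := PySem.Chars.findFrom_natCast_spec s k start hstart hne
      set j0 := PySem.Chars.findFrom s k (start : Int) none with hj0
      rw [if_neg hne]
      have hnn : (0:Int) ≤ j0 := le_trans (by exact_mod_cast Nat.zero_le start) hle
      have hjlt : j0.toNat < s.length := pv_lt_of_prefix hk hpre
      have hji : j0.toNat ≤ i := by
        by_contra h
        exact hmin i hsi (by omega) hp
      rcases Nat.eq_or_lt_of_le hji with heq | hlt
      · exact List.mem_cons.mpr (Or.inl (by rw [← heq, Int.toNat_of_nonneg hnn]))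
      · exact List.mem_cons.mpr <| Or.inr <|
          ih (j0.toNat + 1) i (by omega) (by omega) (by omega) hilen hp

lemma pvOccs_pairwise (s k : List Char) (hk : k ≠ []) : ∀ (fuel start : Nat),
    start ≤ s.length → (pvOccs s k fuel start).Pairwise (· < ·) := by
  intro fuel
  induction fuel with
  | zero => intro start _; simp [pvOccs]
  | succ fuel ih =>
      intro start hstart
      simp only [pvOccs]
      split
      · simp
      · rename_i hne
        obtain ⟨hle, hpre, -⟩ := PySem.Chars.findFrom_natCast_spec s k start hstart hne
        set j0 := PySem.Chars.findFrom s k (start : Int) none with hj0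
        have hjlt : j0.toNat < s.length := pv_lt_of_prefix hk hpre
        refine List.pairwise_cons.mpr ⟨?_, ih (j0.toNat + 1) (by omega)⟩
        intro x hx
        obtain ⟨i, rfl, hi1, -, -⟩ := pvOccs_mem s k hk fuel (j0.toNat + 1) (by omega) x hx
        have hnn : (0:Int) ≤ j0 := le_trans (by exact_mod_cast Nat.zero_le start) hle
        omega

-- membership in pvTarget / pvPairs: "some key matches at position i with value p.2"
lemma pvTarget_mem (s : List Char) (p : Int × Int) :
    p ∈ pvTarget s ↔ ∃ i : Nat, p.1 = (i : Int) ∧ i < s.length ∧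
      ∃ kv ∈ pvValue, kv.1.toList <+: s.drop i ∧ kv.2 = p.2 := by
  simp only [pvTarget, List.mem_filterMap, List.mem_range, Option.map_eq_some_iff]
  constructor
  · rintro ⟨i, hi, v, hv, rfl⟩
    exact ⟨i, rfl, hi, (pvFirstC_some_iff _ _).mp hv⟩
  · rintro ⟨i, hp1, hi, kv, hkv, hpre, hv⟩
    refine ⟨i, hi, p.2, (pvFirstC_some_iff _ _).mpr ⟨kv, hkv, hpre, hv⟩, ?_⟩
    rw [← hp1]

lemma pvTarget_pairwise (s : List Char) :
    (pvTarget s).Pairwise (fun a b => a.1 < b.1) := by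
  unfold pvTarget
  generalize s.length = n
  induction n with
  | zero => simp
  | succ n ih =>
      rw [List.range_succ, List.filterMap_append]
      refine List.pairwise_append.mpr ⟨ih, ?_, ?_⟩
      · cases h : pvFirstC (s.drop n) pvValue <;> simp [h]
      · intro a ha b hb
        obtain ⟨i, hi, v, hv, rfl⟩ := by
          simpa only [List.mem_filterMap, List.mem_range, Option.map_eq_some_iff] using ha
        simp only [List.filterMap_cons, List.filterMap_nil] at hb
        rcases h : pvFirstC (s.drop n) pvValue with - | v2 <;> rw [h] at hb
        · simp at hb
        · simp only [Option.map_some, List.mem_cons, List.not_mem_nil, or_false] at hb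
          subst hb
          show (i : Int) < (n : Int)
          exact_mod_cast hi

lemma pvPairs_mem (s : List Char) (p : Int × Int) :
    p ∈ pvPairs s ↔ ∃ i : Nat, p.1 = (i : Int) ∧ i < s.length ∧
      ∃ kv ∈ pvValue, kv.1.toList <+: s.drop i ∧ kv.2 = p.2 := by
  simp only [pvPairs, List.mem_flatMap, List.mem_map]
  constructor
  · rintro ⟨kv, hkv, j, hj, rfl⟩
    obtain ⟨i, rfl, -, hilen, hpre⟩ :=
      pvOccs_mem s kv.1.toList (pvValue_ne_nil kv hkv) _ 0 (by omega) j hj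
    exact ⟨i, rfl, hilen, kv, hkv, hpre, rfl⟩
  · rintro ⟨i, hp1, hilen, kv, hkv, hpre, hv⟩
    refine ⟨kv, hkv, p.1, ?_, ?_⟩
    · rw [hp1]
      exact pvOccs_mem_of s kv.1.toList (pvValue_ne_nil kv hkv) _ 0 i (by omega) (by omega)
        (by omega) hilen hpre
    · rw [hv]

lemma pvPairs_nodup (s : List Char) : (pvPairs s).Nodup := by
  rw [pvPairs, List.nodup_flatMap]
  constructor
  · intro kv hkv
    refine List.Nodup.map ?_ ?_
    · intro a b hab
      exact congrArg Prod.fst hab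
    · exact ((pvOccs_pairwise s kv.1.toList (pvValue_ne_nil kv hkv) _ 0 (by omega)).imp
        (fun h => ne_of_lt h))
  · refine pvValue_nodup.imp_of_mem ?_
    intro kv1 kv2 h1 h2 hne p hp1 hp2
    simp only [List.mem_map] at hp1 hp2
    obtain ⟨j1, hj1, rfl⟩ := hp1
    obtain ⟨j2, hj2, hp2eq⟩ := hp2
    obtain ⟨i1, he1, -, -, hpre1⟩ :=
      pvOccs_mem s kv1.1.toList (pvValue_ne_nil kv1 h1) _ 0 (by omega) j1 hj1
    obtain ⟨i2, he2, -, -, hpre2⟩ :=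
      pvOccs_mem s kv2.1.toList (pvValue_ne_nil kv2 h2) _ 0 (by omega) j2 hj2
    have hj12 : j2 = j1 := congrArg Prod.fst hp2eq
    have : i1 = i2 := by
      have := he1 ▸ hj12 ▸ he2
      exact_mod_cast this
    exact hne (pv_uniq_at (s.drop i1) kv1 kv2 h1 h2 hpre1 (this ▸ hpre2))

lemma pvTarget_nodup (s : List Char) : (pvTarget s).Nodup :=
  (pvTarget_pairwise s).imp (fun h => by
    intro heq
    rw [heq] at h
    exact lt_irrefl _ h)

lemma pvTarget_perm (s : List Char) : (pvTarget s).Perm (pvPairs s) := by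
  rw [List.perm_ext_iff_of_nodup (pvTarget_nodup s) (pvPairs_nodup s)]
  intro p
  rw [pvTarget_mem, pvPairs_mem]

lemma pv_B_eq (line : String) :
    line_to_digits_alt line = (pvTarget line.toList).map Prod.snd := by
  unfold line_to_digits_alt
  rw [PySem.List.foldl_append_eq_flatMap
    (fun kv : String × Int =>
      (pvOccs line.toList kv.1.toList (line.toList.length + 1) 0).map (fun j => (j, kv.2)))]
  have hsorted : PySem.List.sorted (pvPairs line.toList) (fun p => p.1) = pvTarget line.toList :=
    PySem.List.sorted_eq_of_perm_of_pairwise_lt _ _ _ (pvTarget_perm line.toList)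
      (pvTarget_pairwise line.toList)
  simp only [List.nil_append]
  rw [show pvValue.flatMap
      (fun kv => (pvOccs line.toList kv.1.toList (line.toList.length + 1) 0).map
        (fun j => (j, kv.2))) = pvPairs line.toList from rfl, hsorted]

-- ===== VERDICT (by name: the statement is the Claim_ definition above) =====
theorem line_to_digits_spec : Claim_equal_line_to_digits := by
  intro line _
  unfold Spec_line_to_digits
  rw [pv_A_eq, pv_B_eq]
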